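-- pv_equiv track=rewrite | github.com/Raychani1/Advent_of_Code_Collection | Advent_of_Code_2022/Day_07/aoc_2022_07.py | __sum_dir_sizes
-- ===== SOURCE A (Python) =====
-- from typing import Dict, List, Tuple
--
-- def __sum_dir_sizes(file_system: Dict[str, int]) -> Dict[str, int]:
--     """Add directory size to parent directory size.
--
--     Args:
--         file_system (Dict[str, int]): Current File System.
--
--     Returns:
--         Dict[str, int]: Updated File System.
--     """
--     for key in sorted(file_system, key=len, reverse=True):
--         if key != '/':
--             parent_dir = '/'.join(key.split('/')[:-1])
--             file_system[
--                 parent_dir if parent_dir != '' else '/'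
--             ] += file_system[key]
--
--     return file_system
-- ===== SOURCE B (Python) =====
-- def _parent(key):
--     """Parent directory of a path ('' maps to the root '/')."""
--     p = '/'.join(key.split('/')[:-1])
--     return p if p != '' else '/'
--
--
-- def __sum_dir_sizes(file_system):
--     """Add directory size to parent directory size.
--
--     Instead of sorting by length and propagating sizes one level at a
--     time, snapshot the original direct sizes and add each directory's
--     own size straight onto every one of its ancestors (mutates and
--     returns file_system, like the original).
--     """
--     sizes = dict(file_system)
--     for key, size in sizes.items():
--         if key != '/':
--             anc = _parent(key)
--             while True:
--                 file_system[anc] += size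
--                 if anc == '/':
--                     break
--                 anc = _parent(anc)
--     return file_system
-- ===== Notes on version B (the rewrite author's own statement) =====
-- stated objective: alternative
-- what changed: B drops the sort-by-length pass and the level-by-level propagation of accumulated sizes: it snapshots the original direct sizes and, in one pass over the entries in insertion order, adds each directory's own size directly onto every ancestor on its parent chain.
import Mathlib
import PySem

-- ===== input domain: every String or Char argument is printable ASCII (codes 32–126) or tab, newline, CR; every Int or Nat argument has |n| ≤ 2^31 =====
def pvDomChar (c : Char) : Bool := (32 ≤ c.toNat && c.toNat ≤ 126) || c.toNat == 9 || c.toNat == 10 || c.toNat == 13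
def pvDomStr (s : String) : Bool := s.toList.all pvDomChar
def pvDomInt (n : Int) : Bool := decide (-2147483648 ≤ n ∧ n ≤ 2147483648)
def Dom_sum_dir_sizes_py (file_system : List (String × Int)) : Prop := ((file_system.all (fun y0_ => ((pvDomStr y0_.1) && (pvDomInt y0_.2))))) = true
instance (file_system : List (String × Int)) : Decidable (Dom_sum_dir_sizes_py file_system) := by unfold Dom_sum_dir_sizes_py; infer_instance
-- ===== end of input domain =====

-- B drops A's sort-by-length propagation and instead adds each directory's original size
-- directly onto all of its ancestors (return-value equivalence; both mutate the dict in place).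

-- ===== PORT A =====
-- the parent-directory target of A's line  `parent_dir if parent_dir != '' else '/'`
-- (shared helper: both Pythons compute it with the same `'/'.join(key.split('/')[:-1])` formula)
def tgtOf (key : String) : String :=
  let parent_dir := PySem.Str.join "/" (PySem.List.slice ((PySem.Str.split? key "/").getD []) none (some (-1)))
  if parent_dir ≠ "" then parent_dir else "/"

-- `'/'.join(l + [a])` appends `'/' + a` when l is nonempty
theorem pvJoin_concat (sep a : List Char) :
    ∀ l : List (List Char), l ≠ [] →
      PySem.Chars.join sep (l ++ [a]) = PySem.Chars.join sep l ++ sep ++ a := by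
  intro l
  induction l with
  | nil => intro h; exact absurd rfl h
  | cons x t ih =>
    intro _
    cases t with
    | nil => simp [PySem.Chars.join_cons_cons, PySem.Chars.join_singleton]
    | cons y t' =>
      have ih' := ih (by simp)
      rw [List.cons_append] at ih'
      simp only [List.cons_append, PySem.Chars.join_cons_cons]
      rw [ih']
      simp [List.append_assoc]

-- invariant of the split worker: joining back what it produced re-creates the input
theorem pvJoin_go (sep : List Char) :
    ∀ (fuel : Nat) (l cur : List Char) (acc : List (List Char)),
      PySem.Chars.join sep (PySem.Chars.splitOn.go sep fuel l cur acc) =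
        PySem.Chars.join sep (acc.reverse ++ [cur.reverse ++ l]) := by
  intro fuel
  induction fuel with
  | zero =>
    intro l cur acc
    rw [PySem.Chars.splitOn.go]
    simp
  | succ n ih =>
    intro l cur acc
    cases l with
    | nil => rw [PySem.Chars.splitOn.go] <;> simp
    | cons c rest =>
      rw [PySem.Chars.splitOn.go]
      by_cases hp : sep.isPrefixOf (c :: rest) = true
      · rw [if_pos hp, ih]
        obtain ⟨t, ht⟩ := List.isPrefixOf_iff_prefix.mp hp
        rw [← ht, List.drop_left]
        by_cases hacc : acc = []
        · subst hacc
          simp [PySem.Chars.join_singleton, PySem.Chars.join_cons_cons, List.append_assoc]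
        · have h1 : acc.reverse ≠ [] := by simpa using hacc
          rw [show ((cur.reverse :: acc).reverse ++ [List.reverse [] ++ t])
                = (acc.reverse ++ [cur.reverse]) ++ [t] by simp]
          rw [pvJoin_concat sep t _ (by simp), pvJoin_concat sep cur.reverse _ h1,
              pvJoin_concat sep (cur.reverse ++ (sep ++ t)) _ h1]
          simp [List.append_assoc]
      · rw [if_neg hp, ih]
        simp [List.append_assoc]

-- `'/'.join(cs.split('/')) == cs`
theorem pvJoin_splitOn (sep cs : List Char) :
    PySem.Chars.join sep (PySem.Chars.splitOn cs sep) = cs := by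
  unfold PySem.Chars.splitOn
  rw [pvJoin_go]
  simp [PySem.Chars.join_singleton]

-- the parent target is the root or a strictly shorter path (termination of B's ancestor walk)
theorem pvTgt_len (k : String) :
    tgtOf k = "/" ∨ (tgtOf k).toList.length < k.toList.length := by
  have hsplit : PySem.Str.split? k "/" =
      some ((PySem.Chars.splitOn k.toList ['/']).map String.ofList) := by
    simp [PySem.Str.split?, PySem.Chars.split?, show "/".toList = ['/'] from rfl]
  set ps := PySem.Chars.splitOn k.toList ['/'] with hps
  have hp : tgtOf k =
      (if PySem.Str.join "/" ((ps.map String.ofList).dropLast) ≠ "" then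
        PySem.Str.join "/" ((ps.map String.ofList).dropLast) else "/") := by
    rw [tgtOf, hsplit]
    simp [PySem.List.slice_to_neg_one]
  set p := PySem.Str.join "/" ((ps.map String.ofList).dropLast) with hpdef
  have hplist : p.toList = PySem.Chars.join ['/'] ps.dropLast := by
    rw [hpdef, PySem.Str.toList_join, show "/".toList = ['/'] from rfl,
        ← List.map_dropLast, List.map_map]
    have hmap : List.map (String.toList ∘ String.ofList) ps.dropLast = ps.dropLast := by
      simp [Function.comp_def]
    rw [hmap]
  by_cases hpe : p = ""
  · left; rw [hp, hpe]; simp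
  · right
    rw [hp, if_pos hpe]
    have hdl : ps.dropLast ≠ [] := by
      intro h
      apply hpe
      have : p.toList = [] := by rw [hplist, h, PySem.Chars.join_nil]
      exact String.ext (by simpa using this)
    have hne : ps ≠ [] := by
      intro h; exact hdl (by simp [h])
    have hrecon : PySem.Chars.join ['/'] ps = k.toList := pvJoin_splitOn ['/'] k.toList
    have hsplit2 : ps = ps.dropLast ++ [ps.getLast hne] := (List.dropLast_append_getLast hne).symm
    have : k.toList = PySem.Chars.join ['/'] ps.dropLast ++ ['/'] ++ ps.getLast hne := by
      rw [← hrecon]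
      conv_lhs => rw [hsplit2]
      exact pvJoin_concat ['/'] (ps.getLast hne) ps.dropLast hdl
    rw [hplist]
    have := congrArg List.length this
    simp only [List.length_append, List.length_cons, List.length_nil] at this
    omega

def sum_dir_sizes_py (file_system : List (String × Int)) : List (String × Int) :=
  let d0 := PySem.Dict.mk file_system
  ((PySem.List.sorted d0.keys PySem.Str.len true).foldl
    (fun fs key =>
      if key ≠ "/" then
        let parent_dir := PySem.Str.join "/" (PySem.List.slice ((PySem.Str.split? key "/").getD []) none (some (-1)))
        fs.modify (if parent_dir ≠ "" then parent_dir else "/") 0 (· + fs.getD key 0)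
      else fs) d0).items

-- ===== PORT B =====
-- the `while True: file_system[anc] += size; …` ancestor walk of Source B
def chainAdd (s : PySem.Dict String Int) (anc : String) (size : Int) : PySem.Dict String Int :=
  let s' := s.modify anc 0 (· + size)
  if anc = "/" then s' else chainAdd s' (tgtOf anc) size
termination_by (if anc = "/" then 0 else anc.toList.length + 1)
decreasing_by
  rename_i h
  simp only [if_neg h]
  rcases pvTgt_len anc with h1 | h1
  · simp [h1]
  · split <;> omega

def sum_dir_sizes_py_alt (file_system : List (String × Int)) : List (String × Int) :=
  let d := PySem.Dict.mk file_system
  (d.items.foldl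
    (fun fs kv => if kv.1 ≠ "/" then chainAdd fs (tgtOf kv.1) kv.2 else fs) d).items

-- ===== PRECONDITION & SPEC =====
-- Pre_ excludes (a) lists with duplicate keys, which cannot arise from the Python dict argument,
-- and (b) inputs where some non-root entry's parent directory is absent, on which both A and B
-- raise KeyError instead of returning.
def Pre_sum_dir_sizes_py (file_system : List (String × Int)) : Prop :=
  (file_system.map Prod.fst).Nodup ∧
  ∀ kv ∈ file_system, kv.1 ≠ "/" → tgtOf kv.1 ∈ file_system.map Prod.fst

instance (file_system : List (String × Int)) : Decidable (Pre_sum_dir_sizes_py file_system) := by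
  unfold Pre_sum_dir_sizes_py; infer_instance

def pvWitness_sum_dir_sizes_py : (List (String × Int)) := [("/", 1), ("a", 2), ("a/b", 3)]

def Spec_sum_dir_sizes_py (file_system : List (String × Int)) (out : List (String × Int)) : Prop := out = sum_dir_sizes_py_alt file_system
instance (file_system : List (String × Int)) (out : List (String × Int)) : Decidable (Spec_sum_dir_sizes_py file_system out) := by unfold Spec_sum_dir_sizes_py; infer_instance

-- ===== CLAIM (what is proved, stated in full; the proofs are below) =====
def Claim_equal_sum_dir_sizes_py : Prop := ∀ (file_system : List (String × Int)), Dom_sum_dir_sizes_py file_system → Pre_sum_dir_sizes_py file_system → Spec_sum_dir_sizes_py file_system (sum_dir_sizes_py file_system)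

-- ===== LEMMAS AND PROOFS =====

-- the list of proper ancestors of a path, innermost first, ending at "/"
def chainAnc (k : String) : List String :=
  if k = "/" then [] else tgtOf k :: chainAnc (tgtOf k)
termination_by (if k = "/" then 0 else k.toList.length + 1)
decreasing_by
  rename_i h
  simp only [if_neg h]
  rcases pvTgt_len k with h1 | h1
  · simp [h1]
  · split <;> omega

theorem chainAnc_eq (k : String) :
    chainAnc k = if k = "/" then [] else tgtOf k :: chainAnc (tgtOf k) := by
  rw [chainAnc]

theorem mem_chainAnc_len (k : String) :
    ∀ x ∈ chainAnc k, x = "/" ∨ x.toList.length < k.toList.length := by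
  induction k using chainAnc.induct with
  | case1 =>
    rw [chainAnc_eq]
    intro x hx; simp at hx
  | case2 k hk ih =>
    rw [chainAnc_eq, if_neg hk]
    intro x hx
    rcases List.mem_cons.mp hx with rfl | hx'
    · exact pvTgt_len k
    · rcases ih x hx' with h | h
      · exact Or.inl h
      · rcases pvTgt_len k with h2 | h2
        · rw [h2, chainAnc_eq] at hx'
          simp at hx'
        · exact Or.inr (lt_trans h h2)

theorem not_mem_chainAnc_self (k : String) : k ∉ chainAnc k := by
  intro h
  rcases mem_chainAnc_len k k h with h1 | h1
  · rw [h1, chainAnc_eq] at h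
    simp at h
  · exact absurd h1 (lt_irrefl _)

theorem nodup_chainAnc (k : String) : (chainAnc k).Nodup := by
  induction k using chainAnc.induct with
  | case1 => rw [chainAnc_eq]; simp
  | case2 k hk ih =>
    rw [chainAnc_eq, if_neg hk]
    exact List.nodup_cons.mpr ⟨not_mem_chainAnc_self (tgtOf k), ih⟩

-- under Pre_, every ancestor of a key is itself a key
theorem chainAnc_keys (ks : List String) (hpar : ∀ k ∈ ks, k ≠ "/" → tgtOf k ∈ ks) :
    ∀ k ∈ ks, ∀ x ∈ chainAnc k, x ∈ ks := by
  intro k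
  induction k using chainAnc.induct with
  | case1 =>
    intro _
    rw [chainAnc_eq]
    intro x hx; simp at hx
  | case2 k hk1 ih =>
    intro hkin
    rw [chainAnc_eq, if_neg hk1]
    intro x hx
    have htgt : tgtOf k ∈ ks := hpar k hkin hk1
    rcases List.mem_cons.mp hx with rfl | hx'
    · exact htgt
    · exact ih htgt x hx'

-- counting: x lies on the ancestor chain of c iff it is c's parent or the parent of exactly
-- one chain element (the chain is parent-linked and duplicate-free)
set_option maxHeartbeats 1000000 in
theorem chain_count (c x : String) (hc : c ≠ "/") :
    ((if x ∈ chainAnc c then 1 else 0) : Int) =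
      (if tgtOf c = x then 1 else 0) +
        ((chainAnc c).countP (fun y => decide (y ≠ "/" ∧ tgtOf y = x)) : Int) := by
  revert x hc
  induction c using chainAnc.induct with
  | case1 =>
    intro x hc; exact absurd rfl hc
  | case2 c h1 ih =>
    intro x _
    rw [chainAnc_eq, if_neg h1]
    by_cases hp : tgtOf c = "/"
    · rw [hp]
      rw [show chainAnc "/" = [] from by rw [chainAnc_eq]; simp]
      by_cases hx : x = "/" <;> simp [hx, eq_comm]
    · have ihc := ih x hp
      have hnm := not_mem_chainAnc_self (tgtOf c)
      rw [List.countP_cons]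
      have hpred : decide (tgtOf c ≠ "/" ∧ tgtOf (tgtOf c) = x) = decide (tgtOf (tgtOf c) = x) := by
        simp [hp]
      simp only [hpred]
      by_cases hx : x = tgtOf c
      · have hxm : x ∉ chainAnc (tgtOf c) := by rw [hx]; exact hnm
        rw [if_neg hxm] at ihc
        rw [if_pos (List.mem_cons.mpr (Or.inl hx)), if_pos hx.symm]
        by_cases ht : tgtOf (tgtOf c) = x
        · rw [if_pos ht] at ihc; exfalso; omega
        · rw [if_neg ht] at ihc
          rw [decide_eq_false ht]
          simp only [Bool.false_eq_true, if_false, Nat.add_zero]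
          omega
      · have hne2 : ¬ tgtOf c = x := fun h => hx h.symm
        by_cases hm : x ∈ chainAnc (tgtOf c)
        · rw [if_pos (List.mem_cons.mpr (Or.inr hm)), if_neg hne2]
          rw [if_pos hm] at ihc
          by_cases ht : tgtOf (tgtOf c) = x
          · rw [if_pos ht] at ihc
            rw [decide_eq_true ht]
            simp only [if_true]
            push_cast
            omega
          · rw [if_neg ht] at ihc
            rw [decide_eq_false ht]
            simp only [Bool.false_eq_true, if_false, Nat.add_zero]
            omega
        · have hnc : x ∉ tgtOf c :: chainAnc (tgtOf c) := by simp [List.mem_cons, hx, hm]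
          rw [if_neg hnc, if_neg hne2]
          rw [if_neg hm] at ihc
          by_cases ht : tgtOf (tgtOf c) = x
          · rw [if_pos ht] at ihc
            exfalso; omega
          · rw [if_neg ht] at ihc
            rw [decide_eq_false ht]
            simp only [Bool.false_eq_true, if_false, Nat.add_zero]
            omega

-- counting a predicate over a nodup super-list restricted to a nodup sub-list
theorem countP_transfer (l1 l2 : List String) (p : String → Bool)
    (h1 : l1.Nodup) (h2 : l2.Nodup) (hsub : ∀ y ∈ l2, y ∈ l1) :
    l1.countP (fun y => p y && decide (y ∈ l2)) = l2.countP p := by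
  rw [List.countP_eq_length_filter, List.countP_eq_length_filter]
  have hf1 : (l1.filter (fun y => p y && decide (y ∈ l2))).Nodup := h1.filter _
  have hf2 : (l2.filter p).Nodup := h2.filter _
  rw [← List.toFinset_card_of_nodup hf1, ← List.toFinset_card_of_nodup hf2]
  congr 1
  ext y
  simp only [List.mem_toFinset, List.mem_filter, Bool.and_eq_true, decide_eq_true_eq]
  constructor
  · rintro ⟨-, hp, hy2⟩; exact ⟨hy2, hp⟩
  · rintro ⟨hy2, hp⟩; exact ⟨hsub y hy2, hp, hy2⟩

-- double-sum swap for list sums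
theorem sum_swap {α β : Type} (l1 : List α) (l2 : List β) (f : α → β → Int) :
    (l1.map (fun a => (l2.map (fun b => f a b)).sum)).sum =
      (l2.map (fun b => (l1.map (fun a => f a b)).sum)).sum := by
  induction l1 with
  | nil => simp
  | cons a t ih =>
    simp only [List.map_cons, List.sum_cons, ih]
    rw [← PySem.List.sum_map_add_int]

-- total size poured into x by B: sum of the original sizes of all strict descendants of x
def ancVal (d : PySem.Dict String Int) (x : String) : Int :=
  (d.items.map (fun kv => if kv.1 ≠ "/" ∧ x ∈ chainAnc kv.1 then kv.2 else 0)).sum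

-- final value of a key after A's propagation
def finVal (d : PySem.Dict String Int) (k : String) : Int := d.getD k 0 + ancVal d k

-- amount poured into x by A after processing the keys listed in P
def propVal (d : PySem.Dict String Int) (P : List String) (x : String) : Int :=
  (P.map (fun k' => if k' ≠ "/" ∧ tgtOf k' = x then finVal d k' else 0)).sum

theorem getD_of_mem_items (l : List (String × Int)) (hnd : ((PySem.Dict.mk l).keys).Nodup) :
    ∀ kv ∈ l, (PySem.Dict.mk l).getD kv.1 0 = kv.2 := by
  induction l with
  | nil => intro kv h; cases h
  | cons hd tl ih =>
    obtain ⟨k, v⟩ := hd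
    have hnd2 : (k :: tl.map Prod.fst).Nodup := by
      have hkeys : (PySem.Dict.mk ((k, v) :: tl)).keys = k :: tl.map Prod.fst := by
        simp [PySem.Dict.keys]
      rwa [hkeys] at hnd
    have hnd' : ((PySem.Dict.mk tl).keys).Nodup := by
      have hkeys : (PySem.Dict.mk tl).keys = tl.map Prod.fst := by simp [PySem.Dict.keys]
      rw [hkeys]; exact (List.nodup_cons.mp hnd2).2
    have hkn : k ∉ tl.map Prod.fst := (List.nodup_cons.mp hnd2).1
    intro kv hkv
    rcases List.mem_cons.mp hkv with rfl | hmem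
    · simp [PySem.Dict.getD, PySem.Dict.get?_mk_cons]
    · have hne : k ≠ kv.1 := by
        intro h
        exact hkn (h ▸ List.mem_map_of_mem hmem)
      have : (PySem.Dict.mk ((k, v) :: tl)).get? kv.1 = (PySem.Dict.mk tl).get? kv.1 := by
        rw [show (PySem.Dict.mk ((k, v) :: tl)) = ({ items := (k, v) :: tl } : PySem.Dict String Int) from rfl,
            PySem.Dict.get?_mk_cons]
        simp [hne]
      simp only [PySem.Dict.getD, this]
      exact ih hnd' kv hmem

theorem keys_insert_of_mem (s : PySem.Dict String Int) (k : String) (v : Int)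
    (hk : k ∈ s.keys) : (s.insert k v).keys = s.keys := by
  have hc : s.contains k = true := by
    rw [PySem.Dict.contains, List.any_eq_true]
    rcases List.mem_map.mp hk with ⟨p, hp, hfst⟩
    exact ⟨p, hp, by simp [hfst]⟩
  rw [PySem.Dict.insert, if_pos hc]
  simp only [PySem.Dict.keys, List.map_map]
  apply List.map_congr_left
  intro p _
  by_cases hpk : (p.1 == k) = true
  · simp [(beq_iff_eq.mp hpk).symm]
  · have hne : ¬ p.1 = k := by simpa using hpk
    simp [hne]

-- a sum of guarded constants is a count times the constant
theorem sum_if_count (l : List (String × Int)) (P : String → Prop) [DecidablePred P] (c : Int) :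
    (l.map (fun kv => if P kv.1 then c else 0)).sum =
      ((l.countP (fun kv => decide (P kv.1))) : Int) * c := by
  induction l with
  | nil => simp
  | cons hd tl ih =>
    simp only [List.map_cons, List.sum_cons, List.countP_cons, ih]
    by_cases h : P hd.1 <;> simp [h] <;> push_cast <;> ring

-- the inner sum over potential descendants of a fixed entry cv
theorem inner_count (d : PySem.Dict String Int) (hnd : d.keys.Nodup)
    (hpar : ∀ k ∈ d.keys, k ≠ "/" → tgtOf k ∈ d.keys) (x : String)
    (cv : String × Int) (hcv : cv ∈ d.items) :
    (d.items.map (fun kv =>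
        if (cv.1 ≠ "/" ∧ kv.1 ∈ chainAnc cv.1) ∧ (kv.1 ≠ "/" ∧ tgtOf kv.1 = x) then cv.2 else 0)).sum
      = (if cv.1 ≠ "/" ∧ x ∈ chainAnc cv.1 then cv.2 else 0)
        - (if cv.1 ≠ "/" ∧ tgtOf cv.1 = x then cv.2 else 0) := by
  by_cases hc : cv.1 = "/"
  · simp [hc]
  · have hkeymem : cv.1 ∈ d.keys := List.mem_map_of_mem hcv
    have hchsub : ∀ y ∈ chainAnc cv.1, y ∈ d.keys := chainAnc_keys d.keys hpar cv.1 hkeymem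
    have hcount := chain_count cv.1 x hc
    have hstep1 : (d.items.map (fun kv =>
        if (cv.1 ≠ "/" ∧ kv.1 ∈ chainAnc cv.1) ∧ (kv.1 ≠ "/" ∧ tgtOf kv.1 = x) then cv.2 else 0)).sum
        = (d.items.map (fun kv =>
            if (kv.1 ≠ "/" ∧ tgtOf kv.1 = x) ∧ kv.1 ∈ chainAnc cv.1 then cv.2 else 0)).sum := by
      apply congrArg List.sum
      apply List.map_congr_left
      intro kv _
      by_cases h1 : kv.1 ∈ chainAnc cv.1 <;> by_cases h2 : kv.1 ≠ "/" ∧ tgtOf kv.1 = x <;>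
        simp [h1, h2, hc]
    rw [hstep1, sum_if_count d.items (fun y => (y ≠ "/" ∧ tgtOf y = x) ∧ y ∈ chainAnc cv.1) cv.2]
    have hcnt1 : d.items.countP (fun kv => decide ((kv.1 ≠ "/" ∧ tgtOf kv.1 = x) ∧ kv.1 ∈ chainAnc cv.1))
        = d.keys.countP (fun y => decide ((y ≠ "/" ∧ tgtOf y = x) ∧ y ∈ chainAnc cv.1)) := by
      rw [show d.keys = d.items.map Prod.fst from rfl, List.countP_map]
      rfl
    have hcnt2 : d.keys.countP (fun y => decide ((y ≠ "/" ∧ tgtOf y = x) ∧ y ∈ chainAnc cv.1))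
        = d.keys.countP (fun y => (decide (y ≠ "/" ∧ tgtOf y = x)) && decide (y ∈ chainAnc cv.1)) := by
      apply List.countP_congr
      intro y _
      simp [Bool.decide_and]
    have hcnt3 := countP_transfer d.keys (chainAnc cv.1)
      (fun y => decide (y ≠ "/" ∧ tgtOf y = x)) hnd (nodup_chainAnc cv.1) hchsub
    rw [hcnt1, hcnt2, hcnt3]
    have hxin : ((chainAnc cv.1).countP (fun y => decide (y ≠ "/" ∧ tgtOf y = x)) : Int)
        = (if x ∈ chainAnc cv.1 then 1 else 0) - (if tgtOf cv.1 = x then 1 else 0) := by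
      omega
    rw [hxin]
    by_cases h1 : x ∈ chainAnc cv.1 <;> by_cases h2 : tgtOf cv.1 = x <;>
      simp [h1, h2, hc] <;> ring

-- the partition identity: what A's one-step pours add up to over all keys is exactly ancVal
theorem part_eq (d : PySem.Dict String Int) (hnd : d.keys.Nodup)
    (hpar : ∀ k ∈ d.keys, k ≠ "/" → tgtOf k ∈ d.keys) (x : String) :
    propVal d d.keys x = ancVal d x := by
  have h1 : propVal d d.keys x =
      (d.items.map (fun kv => if kv.1 ≠ "/" ∧ tgtOf kv.1 = x then kv.2 + ancVal d kv.1 else 0)).sum := by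
    unfold propVal
    rw [show d.keys = d.items.map Prod.fst from rfl, List.map_map]
    apply congrArg List.sum
    apply List.map_congr_left
    intro kv hkv
    have hval : d.getD kv.1 0 = kv.2 := getD_of_mem_items d.items hnd kv hkv
    simp only [Function.comp_apply, finVal, hval]
  rw [h1]
  have h3 : (d.items.map (fun kv => if kv.1 ≠ "/" ∧ tgtOf kv.1 = x then kv.2 + ancVal d kv.1 else 0)).sum
      = (d.items.map (fun kv => if kv.1 ≠ "/" ∧ tgtOf kv.1 = x then kv.2 else 0)).sum
        + (d.items.map (fun kv => if kv.1 ≠ "/" ∧ tgtOf kv.1 = x then ancVal d kv.1 else 0)).sum := by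
    rw [← PySem.List.sum_map_add_int]
    apply congrArg List.sum
    apply List.map_congr_left
    intro kv _
    by_cases h : kv.1 ≠ "/" ∧ tgtOf kv.1 = x <;> simp [h]
  rw [h3]
  have h4 : (d.items.map (fun kv => if kv.1 ≠ "/" ∧ tgtOf kv.1 = x then ancVal d kv.1 else 0)).sum
      = (d.items.map (fun kv => (d.items.map (fun cv =>
          if (cv.1 ≠ "/" ∧ kv.1 ∈ chainAnc cv.1) ∧ (kv.1 ≠ "/" ∧ tgtOf kv.1 = x) then cv.2 else 0)).sum)).sum := by
    apply congrArg List.sum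
    apply List.map_congr_left
    intro kv _
    by_cases h : kv.1 ≠ "/" ∧ tgtOf kv.1 = x
    · rw [if_pos h]
      unfold ancVal
      apply congrArg List.sum
      apply List.map_congr_left
      intro cv _
      by_cases h2 : cv.1 ≠ "/" ∧ kv.1 ∈ chainAnc cv.1 <;> simp [h2, h]
    · rw [if_neg h]
      have hz : ∀ cv ∈ d.items, (if (cv.1 ≠ "/" ∧ kv.1 ∈ chainAnc cv.1) ∧ (kv.1 ≠ "/" ∧ tgtOf kv.1 = x) then cv.2 else 0) = (fun _ => (0:Int)) cv := by
        intro cv _; simp [h]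
      rw [List.map_congr_left hz]
      simp
  rw [h4, sum_swap]
  have h5 : ∀ cv ∈ d.items,
      (d.items.map (fun kv =>
        if (cv.1 ≠ "/" ∧ kv.1 ∈ chainAnc cv.1) ∧ (kv.1 ≠ "/" ∧ tgtOf kv.1 = x) then cv.2 else 0)).sum
      = (if cv.1 ≠ "/" ∧ x ∈ chainAnc cv.1 then cv.2 else 0)
        - (if cv.1 ≠ "/" ∧ tgtOf cv.1 = x then cv.2 else 0) :=
    fun cv hcv => inner_count d hnd hpar x cv hcv
  rw [List.map_congr_left h5]
  have h6 : (d.items.map (fun cv =>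
      (if cv.1 ≠ "/" ∧ x ∈ chainAnc cv.1 then cv.2 else 0)
        - (if cv.1 ≠ "/" ∧ tgtOf cv.1 = x then cv.2 else 0))).sum
      = (d.items.map (fun cv => if cv.1 ≠ "/" ∧ x ∈ chainAnc cv.1 then cv.2 else 0)).sum
        - (d.items.map (fun cv => if cv.1 ≠ "/" ∧ tgtOf cv.1 = x then cv.2 else 0)).sum := by
    have := PySem.List.sum_map_add_int d.items
      (fun cv => if cv.1 ≠ "/" ∧ x ∈ chainAnc cv.1 then cv.2 else 0)
      (fun cv => -(if cv.1 ≠ "/" ∧ tgtOf cv.1 = x then cv.2 else 0))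
    simp only [← sub_eq_add_neg] at this
    rw [this]
    have hneg : (d.items.map (fun cv => -(if cv.1 ≠ "/" ∧ tgtOf cv.1 = x then cv.2 else 0))).sum
        = -(d.items.map (fun cv => if cv.1 ≠ "/" ∧ tgtOf cv.1 = x then cv.2 else 0)).sum := by
      induction d.items with
      | nil => simp
      | cons a t ih => simp [ih]; ring
    rw [hneg]; ring
  rw [h6]
  unfold ancVal
  ring

theorem chainAdd_eq (s : PySem.Dict String Int) (a : String) (v : Int) :
    chainAdd s a v =
      (if a = "/" then s.modify a 0 (· + v) else chainAdd (s.modify a 0 (· + v)) (tgtOf a) v) := by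
  rw [chainAdd]

theorem chainAnc_root : chainAnc "/" = [] := by
  rw [chainAnc_eq]; simp

theorem propVal_perm (d : PySem.Dict String Int) (P Q : List String) (hperm : P.Perm Q) (x : String) :
    propVal d P x = propVal d Q x :=
  List.Perm.sum_eq (hperm.map _)

-- A's loop invariant
theorem afold (d : PySem.Dict String Int) (hnd : d.keys.Nodup)
    (hpar : ∀ k ∈ d.keys, k ≠ "/" → tgtOf k ∈ d.keys) :
    ∀ (r p : List String) (s : PySem.Dict String Int),
      PySem.List.sorted d.keys PySem.Str.len true = p ++ r →
      s.keys = d.keys →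
      (∀ x, s.getD x 0 = d.getD x 0 + propVal d p x) →
      (r.foldl (fun s key => if key ≠ "/" then s.modify (tgtOf key) 0 (· + s.getD key 0) else s) s).keys = d.keys ∧
      ∀ x, (r.foldl (fun s key => if key ≠ "/" then s.modify (tgtOf key) 0 (· + s.getD key 0) else s) s).getD x 0 =
        d.getD x 0 + propVal d (p ++ r) x := by
  intro r
  induction r with
  | nil =>
    intro p s hsort hkeys hval
    refine ⟨hkeys, fun x => ?_⟩
    simp only [List.foldl_nil]
    rw [hval x, List.append_nil]
  | cons k r' ih =>
    intro p s hsort hkeys hval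
    have hkperm : (PySem.List.sorted d.keys PySem.Str.len true).Perm d.keys :=
      PySem.List.sorted_perm _ _ _
    have hkmem : k ∈ d.keys := hkperm.mem_iff.mp (by rw [hsort]; exact List.mem_append_cons_self)
    by_cases hk : k = "/"
    · simp only [List.foldl_cons, if_neg (not_not_intro hk)]
      have hval' : ∀ x, s.getD x 0 = d.getD x 0 + propVal d (p ++ [k]) x := by
        intro x
        rw [hval x]
        unfold propVal
        rw [List.map_append, List.sum_append]
        simp [hk]
      obtain ⟨hks, hgd⟩ := ih (p ++ [k]) s (by rw [hsort, List.append_cons]) hkeys hval'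
      refine ⟨hks, fun x => ?_⟩
      rw [hgd x, ← List.append_cons]
    · have hpairwise := PySem.List.sorted_pairwise_rev d.keys PySem.Str.len
      have hle : ∀ k' ∈ r', PySem.Str.len k' ≤ PySem.Str.len k := by
        rw [hsort] at hpairwise
        have h2 := (List.pairwise_append.mp hpairwise).2.1
        exact fun k' h => (List.pairwise_cons.mp h2).1 k' h
      have hnocontrib : ∀ k' ∈ k :: r', ¬(k' ≠ "/" ∧ tgtOf k' = k) := by
        rintro k' hk' ⟨hne, htg⟩
        rcases pvTgt_len k' with h | h
        · exact hk (htg.symm.trans h)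
        · rw [htg] at h
          have hlen : PySem.Str.len k' ≤ PySem.Str.len k := by
            rcases List.mem_cons.mp hk' with rfl | hm
            · exact le_refl _
            · exact hle k' hm
          rw [PySem.Str.len_eq, PySem.Str.len_eq] at hlen
          omega
      have hfin : s.getD k 0 = finVal d k := by
        rw [hval k]
        unfold finVal
        congr 1
        have hsplit : propVal d (p ++ (k :: r')) k = propVal d p k + propVal d (k :: r') k := by
          unfold propVal
          rw [List.map_append, List.sum_append]
        have hzero : propVal d (k :: r') k = 0 := by
          unfold propVal
          have hz : ∀ y ∈ k :: r',
              (if y ≠ "/" ∧ tgtOf y = k then finVal d y else 0) = (fun _ => (0:Int)) y := by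
            intro y hy
            rw [if_neg (hnocontrib y hy)]
          rw [List.map_congr_left hz]
          simp
        have hperm2 : propVal d (p ++ (k :: r')) k = propVal d d.keys k :=
          propVal_perm d _ _ (hsort ▸ hkperm) k
        have : propVal d p k = propVal d d.keys k := by omega
        rw [this, part_eq d hnd hpar k]
      simp only [List.foldl_cons, if_pos hk]
      have hkeys' : (s.modify (tgtOf k) 0 (· + s.getD k 0)).keys = d.keys := by
        rw [PySem.Dict.keys_modify,
            keys_insert_of_mem _ _ _ (by rw [hkeys]; exact hpar k hkmem hk), hkeys]
      have hval' : ∀ x, (s.modify (tgtOf k) 0 (· + s.getD k 0)).getD x 0 =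
          d.getD x 0 + propVal d (p ++ [k]) x := by
        intro x
        rw [PySem.Dict.getD_modify]
        unfold propVal
        rw [List.map_append, List.sum_append]
        simp only [List.map_cons, List.map_nil, List.sum_cons, List.sum_nil]
        by_cases hx : x = tgtOf k
        · subst hx
          rw [if_pos rfl, hval (tgtOf k), hfin, if_pos ⟨hk, rfl⟩]
          unfold propVal
          ring
        · rw [if_neg hx, hval x, if_neg (fun h => hx h.2.symm)]
          unfold propVal
          ring
      obtain ⟨hks, hgd⟩ := ih (p ++ [k]) _ (by rw [hsort, List.append_cons]) hkeys' hval'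
      refine ⟨hks, fun x => ?_⟩
      rw [hgd x, ← List.append_cons]

-- B's ancestor walk, pointwise
theorem chainAdd_getD (s : PySem.Dict String Int) (a : String) (v : Int) (x : String) :
    (chainAdd s a v).getD x 0 = s.getD x 0 + (if x = a ∨ x ∈ chainAnc a then v else 0) := by
  revert x
  induction s, a using chainAdd.induct (size := v) with
  | case1 s =>
    intro x
    rw [chainAdd_eq, if_pos rfl, PySem.Dict.getD_modify]
    by_cases hx : x = "/"
    · rw [if_pos hx, if_pos (Or.inl hx), hx]
    · rw [if_neg hx, if_neg (by rw [chainAnc_root]; simp [hx])]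
      ring
  | case2 s a s' ha ih =>
    intro x
    rw [chainAdd_eq, if_neg ha, ih x, PySem.Dict.getD_modify]
    have hch : chainAnc a = tgtOf a :: chainAnc (tgtOf a) := by rw [chainAnc_eq, if_neg ha]
    by_cases hx : x = a
    · have hnm : ¬(x = tgtOf a ∨ x ∈ chainAnc (tgtOf a)) := by
        intro hor
        have : x ∈ chainAnc a := by rw [hch]; exact List.mem_cons.mpr hor
        rw [hx] at this
        exact not_mem_chainAnc_self a this
      rw [if_neg hnm, if_pos hx, if_pos (Or.inl hx), hx]
      ring
    · rw [if_neg hx]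
      by_cases hm : x = tgtOf a ∨ x ∈ chainAnc (tgtOf a)
      · rw [if_pos hm, if_pos (Or.inr (by rw [hch]; exact List.mem_cons.mpr hm))]
      · rw [if_neg hm, if_neg (by
          rintro (h | h)
          · exact hx h
          · rw [hch] at h
            exact hm (List.mem_cons.mp h))]

theorem chainAdd_keys (s : PySem.Dict String Int) (a : String) (v : Int)
    (ha : a ∈ s.keys) (hch : ∀ y ∈ chainAnc a, y ∈ s.keys) :
    (chainAdd s a v).keys = s.keys := by
  revert ha hch
  induction s, a using chainAdd.induct (size := v) with
  | case1 s =>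
    intro ha _
    rw [chainAdd_eq, if_pos rfl, PySem.Dict.keys_modify, keys_insert_of_mem _ _ _ ha]
  | case2 s a s' ha' ih =>
    intro ha hch
    rw [chainAdd_eq, if_neg ha']
    have hmodkeys : (s.modify a 0 (· + v)).keys = s.keys := by
      rw [PySem.Dict.keys_modify, keys_insert_of_mem _ _ _ ha]
    have hcha : chainAnc a = tgtOf a :: chainAnc (tgtOf a) := by rw [chainAnc_eq, if_neg ha']
    rw [ih (by rw [hmodkeys]; exact hch (tgtOf a) (by rw [hcha]; exact List.mem_cons_self))
          (by intro y hy; rw [hmodkeys]; exact hch y (by rw [hcha]; exact List.mem_cons_of_mem _ hy))]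
    exact hmodkeys

-- B's loop invariant
theorem bfold (d : PySem.Dict String Int)
    (hpar : ∀ k ∈ d.keys, k ≠ "/" → tgtOf k ∈ d.keys) :
    ∀ (l : List (String × Int)) (s : PySem.Dict String Int),
      s.keys = d.keys → (∀ kv ∈ l, kv.1 ∈ d.keys) →
      (l.foldl (fun fs kv => if kv.1 ≠ "/" then chainAdd fs (tgtOf kv.1) kv.2 else fs) s).keys = d.keys ∧
      ∀ x, (l.foldl (fun fs kv => if kv.1 ≠ "/" then chainAdd fs (tgtOf kv.1) kv.2 else fs) s).getD x 0 =
        s.getD x 0 + (l.map (fun kv => if kv.1 ≠ "/" ∧ x ∈ chainAnc kv.1 then kv.2 else 0)).sum := by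
  intro l
  induction l with
  | nil =>
    intro s hkeys _
    exact ⟨hkeys, fun x => by simp⟩
  | cons kv tl ih =>
    intro s hkeys hmem
    have hkv1 : kv.1 ∈ d.keys := hmem kv List.mem_cons_self
    by_cases hk : kv.1 = "/"
    · simp only [List.foldl_cons, if_neg (not_not_intro hk)]
      obtain ⟨hks, hgd⟩ := ih s hkeys (fun p hp => hmem p (List.mem_cons_of_mem _ hp))
      refine ⟨hks, fun x => ?_⟩
      rw [hgd x]
      simp [hk]
    · have htgt : tgtOf kv.1 ∈ d.keys := hpar kv.1 hkv1 hk
      have hch : chainAnc kv.1 = tgtOf kv.1 :: chainAnc (tgtOf kv.1) := by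
        rw [chainAnc_eq, if_neg hk]
      have hkeys' : (chainAdd s (tgtOf kv.1) kv.2).keys = s.keys := by
        apply chainAdd_keys
        · rw [hkeys]; exact htgt
        · intro y hy
          rw [hkeys]
          exact chainAnc_keys d.keys hpar kv.1 hkv1 y (by rw [hch]; exact List.mem_cons_of_mem _ hy)
      simp only [List.foldl_cons, if_pos hk]
      obtain ⟨hks, hgd⟩ := ih (chainAdd s (tgtOf kv.1) kv.2) (by rw [hkeys']; exact hkeys)
        (fun p hp => hmem p (List.mem_cons_of_mem _ hp))
      refine ⟨hks, fun x => ?_⟩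
      rw [hgd x, chainAdd_getD]
      have hhead : (if x = tgtOf kv.1 ∨ x ∈ chainAnc (tgtOf kv.1) then kv.2 else 0) =
          (if kv.1 ≠ "/" ∧ x ∈ chainAnc kv.1 then kv.2 else 0) := by
        by_cases hm : x = tgtOf kv.1 ∨ x ∈ chainAnc (tgtOf kv.1)
        · rw [if_pos hm, if_pos ⟨hk, by rw [hch]; exact List.mem_cons.mpr hm⟩]
        · rw [if_neg hm, if_neg (fun h => hm (List.mem_cons.mp (by rw [← hch]; exact h.2)))]
      rw [hhead]
      simp only [List.map_cons, List.sum_cons]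
      ring

-- ===== VERDICT (by name: the statement is the Claim_ definition above) =====
theorem sum_dir_sizes_py_spec : Claim_equal_sum_dir_sizes_py := by
  intro fs _ hpre
  unfold Spec_sum_dir_sizes_py
  obtain ⟨hnd0, hpar0⟩ := hpre
  set d := PySem.Dict.mk fs with hd
  have hnd : d.keys.Nodup := hnd0
  have hpar : ∀ k ∈ d.keys, k ≠ "/" → tgtOf k ∈ d.keys := by
    intro k hk hkne
    rcases List.mem_map.mp hk with ⟨kv, hkv, rfl⟩
    exact hpar0 kv hkv hkne
  have eA : sum_dir_sizes_py fs =
      ((PySem.List.sorted d.keys PySem.Str.len true).foldl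
        (fun s key => if key ≠ "/" then s.modify (tgtOf key) 0 (· + s.getD key 0) else s) d).items := rfl
  have eB : sum_dir_sizes_py_alt fs =
      (d.items.foldl (fun s kv => if kv.1 ≠ "/" then chainAdd s (tgtOf kv.1) kv.2 else s) d).items := rfl
  obtain ⟨hksA, hgdA⟩ := afold d hnd hpar (PySem.List.sorted d.keys PySem.Str.len true) [] d
    (List.nil_append _).symm rfl (by intro x; simp [propVal])
  obtain ⟨hksB, hgdB⟩ := bfold d hpar d.items d rfl (fun kv hkv => List.mem_map_of_mem hkv)
  rw [eA, eB,
      PySem.Dict.items_eq_map_keys _ (by rw [hksA]; exact hnd) 0,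
      PySem.Dict.items_eq_map_keys _ (by rw [hksB]; exact hnd) 0,
      hksA, hksB]
  apply List.map_congr_left
  intro k _
  rw [hgdA k, hgdB k]
  have hpropanc : propVal d ([] ++ PySem.List.sorted d.keys PySem.Str.len true) k = ancVal d k := by
    rw [List.nil_append,
        propVal_perm d _ _ (PySem.List.sorted_perm d.keys PySem.Str.len true) k,
        part_eq d hnd hpar k]
  rw [hpropanc]
  rfl
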